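-- pv_equiv track=rewrite | github.com/ZuzkaK11/Crossword-solver | crossword.py | get_positions
-- ===== SOURCE A (Python) =====
-- def get_positions(grid):
--     # Computes list of all possible positions for words.
--     # Each position is a touple: (start_row, start_col, length, direction),
--     # and length must be at least 2, i.e. positions for a single letter
--     # (length==1) are omitted.
--     # Note: Currently only for 'down' and 'right' directions.
--     def check_line(line):
--         res = []
--         start_i, was_space = 0, False
--         for i in range(len(line)):
--             if line[i] == '#' and was_space:
--                 was_space = False
--                 if i - start_i > 1:
--                     res.append((start_i, i - start_i))
--             elif line[i] == ' ' and not was_space: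
--                 start_i = i
--                 was_space = True
--         return res
--
--     poss = []
--     for r in range(len(grid)):
--         row = grid[r]
--         poss = poss + [(r, p[0], p[1], 'right') for p in check_line(row)]
--     for c in range(len(grid[0])):
--         column = [row[c] for row in grid]
--         poss = poss + [(p[0], c, p[1], 'down') for p in check_line(column)]
--     return poss
-- ===== SOURCE B (Python) =====
-- def get_positions(grid):
--     # Computes all word positions; runs found by splitting each line on '#'
--     # and locating the first space of each terminated segment.
--     def runs(line):
--         res, off = [], 0
--         segs = line.split('#')
--         for seg in segs[:-1]:
--             i = seg.find(' ')
--             if i >= 0 and len(seg) - i > 1: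
--                 res.append((off + i, len(seg) - i))
--             off += len(seg) + 1
--         return res
--
--     poss = [(r, s, l, 'right') for r, row in enumerate(grid) for s, l in runs(row)]
--     poss += [(s, c, l, 'down')
--              for c, col in enumerate(''.join(t) for t in zip(*grid)) for s, l in runs(col)]
--     return poss
-- ===== Notes on version B (the rewrite author's own statement) =====
-- stated objective: simpler
-- what changed: check_line's per-character state machine (was_space/start_i flags) is replaced by splitting each line on '#' and taking the first space of every terminated segment, and the hand-built column strings by zip(*grid).
import Mathlib
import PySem

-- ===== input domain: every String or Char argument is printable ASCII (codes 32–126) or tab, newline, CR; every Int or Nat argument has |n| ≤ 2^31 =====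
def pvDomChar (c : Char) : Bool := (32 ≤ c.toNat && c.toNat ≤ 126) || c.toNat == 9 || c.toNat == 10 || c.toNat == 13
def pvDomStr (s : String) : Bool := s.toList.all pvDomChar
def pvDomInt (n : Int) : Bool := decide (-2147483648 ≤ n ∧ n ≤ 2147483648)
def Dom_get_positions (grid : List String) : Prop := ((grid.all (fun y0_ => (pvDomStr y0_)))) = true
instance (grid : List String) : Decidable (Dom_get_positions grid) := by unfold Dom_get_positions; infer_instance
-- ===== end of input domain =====

-- B replaces A's per-character state machine by splitting each line on '#' and taking the
-- first space of every terminated segment (objective: simpler).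

-- ===== PORT A =====
-- one step of check_line's loop body; state = (res, start_i, was_space)
def pvStepA (st : List (Int × Int) × Int × Bool) (ic : Int × Char) : List (Int × Int) × Int × Bool :=
  if ic.2 = '#' ∧ st.2.2 then
    ((if ic.1 - st.2.1 > 1 then st.1 ++ [(st.2.1, ic.1 - st.2.1)] else st.1), st.2.1, false)
  else if ic.2 = ' ' ∧ ¬ st.2.2 then
    (st.1, ic.1, true)
  else st

-- check_line: `for i in range(len(line)): line[i] …` as a fold over the indexed characters
def pvCheckLine (line : List Char) : List (Int × Int) :=
  ((PySem.List.enumerate line 0).foldl pvStepA ([], 0, false)).1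

def get_positions (grid : List String) : List (Int × Int × Int × String) :=
  let poss := (PySem.List.enumerate grid 0).foldl
    (fun acc rc => acc ++ (pvCheckLine rc.2.toList).map (fun p => (rc.1, p.1, p.2, "right"))) []
  -- grid[0] raises IndexError on [] (headD "" stands in; excluded by Pre_);
  -- row[c] raises IndexError when c ≥ len(row) (getD ' ' stands in; excluded by Pre_)
  (List.range (grid.headD "").toList.length).foldl
    (fun acc (c : Nat) => acc ++ (pvCheckLine (grid.map (fun row => row.toList.getD c ' '))).map
      (fun p => (p.1, (c : Int), p.2, "down"))) poss

-- ===== PORT B =====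
-- zip(*rows): tuples up to the shortest row (hand port of the zip builtin; the getD default
-- is never reached since c < min of the lengths)
def pvZip (rows : List (List Char)) : List (List Char) :=
  match (rows.map List.length).min? with
  | none => []
  | some n => (List.range n).map (fun c => rows.map (fun r => r.getD c ' '))

-- one segment step of runs: i = seg.find(' '); append (off+i, len(seg)-i) if a long run; advance off
def pvStepB (st : List (Int × Int) × Nat) (seg : List Char) : List (Int × Int) × Nat :=
  ((if 0 ≤ PySem.Chars.find seg [' '] ∧
        (seg.length : Int) - PySem.Chars.find seg [' '] > 1 then
      st.1 ++ [(((st.2 : Int) + PySem.Chars.find seg [' ']),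
                ((seg.length : Int) - PySem.Chars.find seg [' ']))]
    else st.1),
   st.2 + seg.length + 1)

-- runs: split on '#', first space of each terminated segment (segs[:-1])
def pvRuns (line : List Char) : List (Int × Int) :=
  ((PySem.List.slice (PySem.Chars.splitOn line ['#']) none (some (-1))).foldl
    pvStepB ([], 0)).1

def get_positions_alt (grid : List String) : List (Int × Int × Int × String) :=
  ((PySem.List.enumerate grid 0).flatMap
      (fun rc => (pvRuns rc.2.toList).map (fun p => (rc.1, p.1, p.2, "right"))))
  ++ ((PySem.List.enumerate (pvZip (grid.map String.toList)) 0).flatMap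
      (fun cc => (pvRuns cc.2).map (fun p => (p.1, cc.1, p.2, "down"))))

-- ===== PRECONDITION & SPEC =====
-- A raises IndexError on the empty grid (grid[0]) and whenever some row is shorter than row 0
-- (row[c] in the column loop); exactly those inputs are excluded.
def Pre_get_positions (grid : List String) : Prop :=
  grid ≠ [] ∧ ∀ s ∈ grid, (grid.headD "").toList.length ≤ s.toList.length
instance (grid : List String) : Decidable (Pre_get_positions grid) := by
  unfold Pre_get_positions; infer_instance

def pvWitness_get_positions : List String := [" ab#", "# c ", "    "]

def Spec_get_positions (grid : List String) (out : List (Int × Int × Int × String)) : Prop :=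
  out = get_positions_alt grid
instance (grid : List String) (out : List (Int × Int × Int × String)) :
    Decidable (Spec_get_positions grid out) := by unfold Spec_get_positions; infer_instance

-- ===== CLAIM (what is proved, stated in full; the proofs are below) =====
def Claim_equal_get_positions : Prop := ∀ (grid : List String), Dom_get_positions grid →
  Pre_get_positions grid → Spec_get_positions grid (get_positions grid)

-- ===== LEMMAS AND PROOFS =====

-- first index of ' ' in a segment (structural)
def pvFindSp : List Char → Option Nat
  | [] => none
  | c :: cs => if c = ' ' then some 0 else (pvFindSp cs).map (· + 1)

-- split on '#': (first segment, remaining segments)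
def pvSplit : List Char → List Char × List (List Char)
  | [] => ([], [])
  | c :: cs =>
      let r := pvSplit cs
      if c = '#' then ([], r.1 :: r.2) else (c :: r.1, r.2)

-- the run a single terminated segment contributes, at absolute offset k
def pvRunOf (k : Int) (seg : List Char) : List (Int × Int) :=
  match pvFindSp seg with
  | none => []
  | some i => if (seg.length : Int) - i > 1 then [((k + i), ((seg.length : Int) - i))] else []

-- start_i after a segment is processed (irrelevant once was_space is false again)
def pvStart (k : Int) (s : Int) (seg : List Char) : Int :=
  match pvFindSp seg with
  | none => s
  | some i => k + i

-- runs of a list of terminated segments, at absolute offset k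
def pvRunsList (k : Int) : List (List Char) → List (Int × Int)
  | [] => []
  | seg :: rest => pvRunOf k seg ++ pvRunsList (k + seg.length + 1) rest

theorem pv_find_go_eq (l : List Char) (k : Nat) :
    PySem.Chars.find.go [' '] l k =
      match pvFindSp l with | none => -1 | some i => (k : Int) + i := by
  induction l generalizing k with
  | nil => simp [PySem.Chars.find.go, pvFindSp]
  | cons c cs ih =>
    by_cases hc : c = ' '
    · simp [PySem.Chars.find.go, pvFindSp, hc, List.isPrefixOf]
    · have hpre : ([' '].isPrefixOf (c :: cs)) = false := by
        simp [List.isPrefixOf]; exact fun h => absurd h.symm hc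
      cases hf : pvFindSp cs with
      | none => simp [PySem.Chars.find.go, hpre, pvFindSp, hc, ih, hf]
      | some i =>
        simp [PySem.Chars.find.go, hpre, pvFindSp, hc, ih, hf]
        ring

theorem pv_find_eq (l : List Char) :
    PySem.Chars.find l [' '] =
      match pvFindSp l with | none => -1 | some i => (i : Int) := by
  have := pv_find_go_eq l 0
  rw [PySem.Chars.find, this]
  cases pvFindSp l <;> simp

theorem pv_splitOn_go_eq (fuel : Nat) (l cur : List Char) (acc : List (List Char))
    (h : l.length < fuel) :
    PySem.Chars.splitOn.go ['#'] fuel l cur acc =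
      acc.reverse ++ (cur.reverse ++ (pvSplit l).1) :: (pvSplit l).2 := by
  induction fuel generalizing l cur acc with
  | zero => omega
  | succ f ih =>
    cases l with
    | nil => simp [PySem.Chars.splitOn.go, pvSplit]
    | cons c cs =>
      by_cases hc : c = '#'
      · have hpre : (['#'].isPrefixOf (c :: cs)) = true := by simp [List.isPrefixOf, hc]
        simp at h
        simp [PySem.Chars.splitOn.go, pvSplit, hc, ih _ _ _ h]
      · have hpre : (['#'].isPrefixOf (c :: cs)) = false := by
          simp [List.isPrefixOf]; exact fun h => absurd h.symm hc
        simp at h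
        simp [PySem.Chars.splitOn.go, hpre, pvSplit, hc, ih _ _ _ h]

theorem pv_splitOn_eq (l : List Char) :
    PySem.Chars.splitOn l ['#'] = (pvSplit l).1 :: (pvSplit l).2 := by
  have := pv_splitOn_go_eq (l.length + 1) l [] [] (by omega)
  simpa [PySem.Chars.splitOn] using this

theorem pvSplit_recombine (l : List Char) :
    (pvSplit l).1 ++ ((pvSplit l).2.flatMap (fun s => '#' :: s)) = l := by
  induction l with
  | nil => simp [pvSplit]
  | cons c cs ih =>
    by_cases hc : c = '#' <;> simp [pvSplit, hc, ih]

theorem pvSplit_noHash (l : List Char) :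
    '#' ∉ (pvSplit l).1 ∧ ∀ s ∈ (pvSplit l).2, '#' ∉ s := by
  induction l with
  | nil => simp [pvSplit]
  | cons c cs ih =>
    by_cases hc : c = '#'
    · simp [pvSplit, hc]; exact ⟨ih.1, ih.2⟩
    · simp [pvSplit, hc]; exact ⟨⟨fun h => hc h.symm, ih.1⟩, ih.2⟩

-- one B step appends exactly the run of the segment
theorem pvStepB_eq (res : List (Int × Int)) (k : Nat) (seg : List Char) :
    pvStepB (res, k) seg = (res ++ pvRunOf (k : Int) seg, k + seg.length + 1) := by
  cases hf : pvFindSp seg with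
  | none =>
    rw [pvStepB, pv_find_eq, hf]
    rw [if_neg (by omega : ¬((0 : Int) ≤ -1 ∧ (seg.length : Int) - (-1) > 1))]
    simp [pvRunOf, hf]
  | some i =>
    rw [pvStepB, pv_find_eq, hf]
    by_cases hi : (seg.length : Int) - (i : Int) > 1
    · rw [if_pos ⟨Int.natCast_nonneg i, hi⟩]
      simp [pvRunOf, hf, hi]
    · rw [if_neg (fun hand => hi hand.2)]
      simp [pvRunOf, hf, hi]

-- B's fold over the terminated segments computes pvRunsList
theorem pvRuns_fold (segs : List (List Char)) (res : List (Int × Int)) (k : Nat) :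
    ((segs.foldl pvStepB (res, k)).1) = res ++ pvRunsList (k : Int) segs := by
  induction segs generalizing res k with
  | nil => simp [pvRunsList]
  | cons seg rest ih =>
    rw [List.foldl_cons, pvStepB_eq, ih]
    rw [show ((k + seg.length + 1 : Nat) : Int) = (k : Int) + seg.length + 1 from by push_cast; ring]
    simp [pvRunsList]

-- A's state machine: was_space = true is inert inside a '#'-free block
theorem pvStepA_true (seg : List Char) (h : '#' ∉ seg) (res : List (Int × Int)) (s : Int)
    (k : Int) :
    (PySem.List.enumerate seg k).foldl pvStepA (res, s, true) = (res, s, true) := by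
  induction seg generalizing k with
  | nil => simp [PySem.List.enumerate_nil]
  | cons c cs ih =>
    simp at h
    rw [PySem.List.enumerate_cons]
    simp only [List.foldl_cons]
    rw [show pvStepA (res, s, true) (k, c) = (res, s, true) by
      simp [pvStepA]; exact fun hc => h.1 hc.symm]
    exact ih h.2 _

-- A's state machine across one terminated segment
theorem pvStepA_seg (seg : List Char) (h : '#' ∉ seg) (rest : List Char)
    (res : List (Int × Int)) (s : Int) (k : Int) :
    (PySem.List.enumerate (seg ++ '#' :: rest) k).foldl pvStepA (res, s, false) =
      (PySem.List.enumerate rest (k + seg.length + 1)).foldl pvStepA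
        (res ++ pvRunOf k seg, pvStart k s seg, false) := by
  induction seg generalizing k res s with
  | nil =>
    rw [List.nil_append, PySem.List.enumerate_cons]
    simp only [List.foldl_cons]
    rw [show pvStepA (res, s, false) (k, '#') = (res, s, false) by simp [pvStepA]]
    simp [pvRunOf, pvStart, pvFindSp]
  | cons c cs ih =>
    simp at h
    rw [List.cons_append, PySem.List.enumerate_cons, List.foldl_cons]
    by_cases hc : c = ' '
    · rw [show pvStepA (res, s, false) (k, c) = (res, k, true) by simp [pvStepA, hc, h.1]]
      rw [PySem.List.enumerate_append, List.foldl_append]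
      rw [pvStepA_true cs h.2 res k (k + 1)]
      rw [PySem.List.enumerate_cons, List.foldl_cons]
      rw [show pvStepA (res, k, true) (k + 1 + (cs.length : Int), '#') =
          ((if k + 1 + (cs.length : Int) - k > 1 then
              res ++ [(k, k + 1 + (cs.length : Int) - k)] else res), k, false) by
        simp [pvStepA]]
      have hrun : pvRunOf k (c :: cs) =
          (if k + 1 + (cs.length : Int) - k > 1 then [(k, k + 1 + (cs.length : Int) - k)]
           else []) := by
        simp only [pvRunOf, pvFindSp, hc]
        norm_num
        split_ifs with h1 h2 <;> (try rfl) <;> push_cast at * <;> (try omega) <;> simp <;> omega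
      have hst : pvStart k s (c :: cs) = k := by simp [pvStart, pvFindSp, hc]
      rw [hrun, hst]
      have hd : (if k + 1 + (cs.length : Int) - k > 1 then
            res ++ [(k, k + 1 + (cs.length : Int) - k)] else res) =
          res ++ (if k + 1 + (cs.length : Int) - k > 1 then
            [(k, k + 1 + (cs.length : Int) - k)] else []) := by
        split_ifs <;> simp
      rw [hd, show k + 1 + (cs.length : Int) + 1 = k + ((c :: cs).length : Int) + 1 from by
        push_cast [List.length_cons]; ring]
    · rw [show pvStepA (res, s, false) (k, c) = (res, s, false) by simp [pvStepA, hc, h.1]]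
      rw [ih h.2 res s (k + 1)]
      have hrun : pvRunOf (k + 1) cs = pvRunOf k (c :: cs) := by
        simp [pvRunOf, pvFindSp, hc]
        cases hf : pvFindSp cs with
        | none => simp
        | some i =>
          simp only [Option.map_some]
          push_cast
          split_ifs with h1 h2 <;> (try omega) <;> (try rfl) <;> (try simp) <;> omega
      have hst : pvStart (k + 1) s cs = pvStart k s (c :: cs) := by
        simp [pvStart, pvFindSp, hc]
        cases hf : pvFindSp cs with
        | none => simp
        | some i => simp; ring
      rw [hrun, hst]
      rw [show k + 1 + (cs.length : Int) + 1 = k + ((c :: cs).length : Int) + 1 from by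
        push_cast [List.length_cons]; ring]

-- A's state machine on the trailing (unterminated) segment adds nothing
theorem pvStepA_tail (seg : List Char) (h : '#' ∉ seg) (res : List (Int × Int)) (s : Int)
    (k : Int) :
    ((PySem.List.enumerate seg k).foldl pvStepA (res, s, false)).1 = res := by
  induction seg generalizing k s with
  | nil => simp [PySem.List.enumerate_nil]
  | cons c cs ih =>
    simp at h
    rw [PySem.List.enumerate_cons, List.foldl_cons]
    by_cases hc : c = ' '
    · rw [show pvStepA (res, s, false) (k, c) = (res, k, true) by simp [pvStepA, hc, h.1]]
      rw [pvStepA_true cs h.2 res k (k + 1)]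
    · rw [show pvStepA (res, s, false) (k, c) = (res, s, false) by simp [pvStepA, hc, h.1]]
      exact ih h.2 _ _

-- A's state machine over a whole line, glued from its '#'-free segments
theorem pvStepA_glue (t : List (List Char)) (hd : List Char) (h1 : '#' ∉ hd)
    (h2 : ∀ s ∈ t, '#' ∉ s) (res : List (Int × Int)) (s : Int) (k : Int) :
    ((PySem.List.enumerate (hd ++ t.flatMap (fun s => '#' :: s)) k).foldl pvStepA
        (res, s, false)).1 = res ++ pvRunsList k ((hd :: t).dropLast) := by
  induction t generalizing hd res s k with
  | nil =>
    simp only [List.flatMap_nil, List.append_nil, List.dropLast]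
    rw [pvStepA_tail hd h1 res s k]
    simp [pvRunsList]
  | cons t0 t' ih =>
    rw [show hd ++ (t0 :: t').flatMap (fun s => '#' :: s) =
        hd ++ '#' :: (t0 ++ t'.flatMap (fun s => '#' :: s)) from by simp]
    rw [pvStepA_seg hd h1 _ res s k]
    rw [ih t0 (h2 t0 (by simp)) (fun x hx => h2 x (by simp [hx])) _ _ _]
    rw [show (hd :: t0 :: t').dropLast = hd :: (t0 :: t').dropLast from rfl]
    simp [pvRunsList]

-- the core: check_line = runs on every line
theorem pvCheckLine_eq_pvRuns (line : List Char) : pvCheckLine line = pvRuns line := by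
  unfold pvCheckLine pvRuns
  rw [pv_splitOn_eq, PySem.List.slice_to_neg_one]
  obtain ⟨h1, h2⟩ := pvSplit_noHash line
  have hg := pvStepA_glue (pvSplit line).2 (pvSplit line).1 h1 h2 [] 0 0
  rw [pvSplit_recombine] at hg
  rw [hg, pvRuns_fold]
  simp

theorem pv_enum_map {α β : Type} (f : α → β) (l : List α) (s : Int) :
    PySem.List.enumerate (l.map f) s = (PySem.List.enumerate l s).map (fun p => (p.1, f p.2)) := by
  induction l generalizing s with
  | nil => simp [PySem.List.enumerate_nil]
  | cons x xs ih => simp [PySem.List.enumerate_cons, ih]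

theorem pv_enum_range (n : Nat) :
    PySem.List.enumerate (List.range n) 0 = (List.range n).map (fun (c : Nat) => ((c : Int), c)) := by
  induction n with
  | zero => simp [PySem.List.enumerate_nil]
  | succ m ih =>
    rw [List.range_succ, PySem.List.enumerate_append, ih]
    simp [PySem.List.enumerate_cons, PySem.List.enumerate_nil]

-- ===== VERDICT (by name: the statement is the Claim_ definition above) =====
theorem get_positions_spec : Claim_equal_get_positions := by
  intro grid _ hPre
  unfold Spec_get_positions get_positions get_positions_alt
  obtain ⟨hne, hlen⟩ := hPre
  rw [PySem.List.foldl_append_eq_flatMap, PySem.List.foldl_append_eq_flatMap]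
  have hmin : ((grid.map String.toList).map List.length).min? =
      some ((grid.headD "").toList.length) := by
    rw [List.min?_eq_some_iff]
    constructor
    · cases grid with
      | nil => exact absurd rfl hne
      | cons a l => simp
    · intro b hb
      simp only [List.map_map, List.mem_map, Function.comp] at hb
      obtain ⟨x, hx, rfl⟩ := hb
      exact hlen x hx
  unfold pvZip
  rw [hmin]
  rw [pv_enum_map _ (List.range _) 0, pv_enum_range]
  simp [List.flatMap_map, List.map_map, Function.comp_def, pvCheckLine_eq_pvRuns]
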